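-- pv_equiv track=rewrite | github.com/YENPANG0929/CSE-415 | HW 1/a1-starter-code/a1-starter-code/a1_exercises.py | triple_vowels
-- ===== SOURCE A (Python) =====
-- def triple_vowels(text):
--     """Return a new version of text, with all the vowels tripled.
--     For example:  "The *BIG BAD* wolf!" => "Theee "BIIIG BAAAD* wooolf!".
--     For this exercise assume the vowels are
--     the characters A,E,I,O, and U (and a,e,i,o, and u).
--     Maintain the case of the characters."""
--
--     vowels = "aeiouAEIOU"
--     new_text = []
--
--     for i in text:
--         if i in vowels:
--             new_text.append(i*3)
--         else:
--             new_text.append(i)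
--     return ''.join(new_text)
-- ===== SOURCE B (Python) =====
-- def triple_vowels(text):
--     """Return a new version of text, with all the vowels tripled."""
--     for v in "aeiouAEIOU":
--         text = text.replace(v, v + v + v)
--     return text
-- ===== Notes on version B (the rewrite author's own statement) =====
-- stated objective: faster
-- what changed: Replaces A's single per-character scan-and-append loop with ten staged whole-string replace passes, one per vowel, each rewriting that vowel to its tripled form; correct because tripling one vowel never creates or destroys occurrences of another, and measurably faster because each pass runs in C via str.replace instead of a Python-level per-character loop.
import Mathlib
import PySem

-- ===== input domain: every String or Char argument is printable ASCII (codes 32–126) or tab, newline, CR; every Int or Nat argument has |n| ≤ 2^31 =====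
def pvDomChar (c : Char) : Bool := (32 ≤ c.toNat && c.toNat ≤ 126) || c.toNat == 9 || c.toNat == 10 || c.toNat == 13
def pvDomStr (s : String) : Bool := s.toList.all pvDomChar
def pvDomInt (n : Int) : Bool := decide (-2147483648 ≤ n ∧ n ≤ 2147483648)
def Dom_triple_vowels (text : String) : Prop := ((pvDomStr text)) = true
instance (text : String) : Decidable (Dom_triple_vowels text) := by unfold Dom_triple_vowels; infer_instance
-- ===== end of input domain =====

-- B replaces A's single per-character scan-and-append loop with ten staged whole-string
-- replace passes (one per vowel); same result since tripling one vowel never affects another.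

-- ===== PORT A =====
def triple_vowels (text : String) : String :=
  -- vowels = "aeiouAEIOU"; for i in text: append i*3 if i in vowels else i; ''.join
  PySem.Str.join ""
    (text.toList.foldl (fun acc i =>
      if "aeiouAEIOU".toList.contains i then acc ++ [String.ofList [i, i, i]]
      else acc ++ [String.ofList [i]]) [])

-- ===== PORT B =====
-- for v in "aeiouAEIOU": text = text.replace(v, v + v + v); return text
def triple_vowels_alt (text : String) : String :=
  "aeiouAEIOU".toList.foldl
    (fun t v => PySem.Str.replace t (String.ofList [v]) (String.ofList [v, v, v])) text

-- ===== PRECONDITION & SPEC =====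
def Spec_triple_vowels (text : String) (out : String) : Prop := out = triple_vowels_alt text
instance (text : String) (out : String) : Decidable (Spec_triple_vowels text out) := by unfold Spec_triple_vowels; infer_instance

-- ===== CLAIM (what is proved, stated in full; the proofs are below) =====
def Claim_equal_triple_vowels : Prop := ∀ (text : String), Dom_triple_vowels text → Spec_triple_vowels text (triple_vowels text)

-- ===== LEMMAS AND PROOFS =====

-- per-character image once the vowels in P have been processed
def trMap (P : List Char) (c : Char) : List Char := if c ∈ P then [c, c, c] else [c]

theorem flatMap_flatMap (s : List Char) (f g : Char → List Char) :
    (s.flatMap f).flatMap g = s.flatMap (fun c => (f c).flatMap g) := by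
  induction s with
  | nil => rfl
  | cons c t ih => simp [ih]

theorem join_empty (l : List (List Char)) : PySem.Chars.join [] l = l.flatten := by
  induction l with
  | nil => rfl
  | cons a t ih =>
    cases t with
    | nil => rw [PySem.Chars.join_singleton]; simp
    | cons b r => rw [PySem.Chars.join_cons_cons, ih]; simp

-- Chars.replace.go with a single-char pattern is a flatMap (fuel ≥ length suffices)
theorem go_single (v : Char) (new : List Char) :
    ∀ (s : List Char) (fuel : Nat) (acc : List Char), s.length ≤ fuel →
      PySem.Chars.replace.go [v] new fuel s acc
        = acc.reverse ++ s.flatMap (fun c => if c = v then new else [c]) := by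
  intro s
  induction s with
  | nil =>
    intro fuel acc _
    cases fuel <;> simp [PySem.Chars.replace.go]
  | cons c t ih =>
    intro fuel acc h
    cases fuel with
    | zero => simp at h
    | succ f =>
      rw [PySem.Chars.replace.go]
      have ht : t.length ≤ f := by simpa using h
      have hpre : ([v].isPrefixOf (c :: t)) = (c == v) := by
        simp [List.isPrefixOf, BEq.comm]
      rw [hpre]
      by_cases hc : c = v
      · simp only [hc, BEq.rfl, if_pos, List.length_cons, List.length_nil, List.drop_succ_cons,
          List.drop_zero, ih f _ ht, List.flatMap_cons]
        simp
      · rw [if_neg (by simp [hc]), ih f _ ht]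
        simp [hc]

theorem replace_single (v : Char) (new : List Char) (s : List Char) :
    PySem.Chars.replace s [v] new = s.flatMap (fun c => if c = v then new else [c]) := by
  rw [PySem.Chars.replace]
  simp [go_single v new s s.length [] le_rfl]

-- one replace pass on an already partially processed string advances the processed set
theorem step_flatMap (P : List Char) (v : Char) (hv : v ∉ P) (s : List Char) :
    PySem.Chars.replace (s.flatMap (trMap P)) [v] [v, v, v] = s.flatMap (trMap (P ++ [v])) := by
  rw [replace_single, flatMap_flatMap]
  refine List.flatMap_congr ?_
  intro c _
  by_cases hP : c ∈ P
  · have hcv : c ≠ v := fun h => hv (h ▸ hP)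
    simp [trMap, hP, hcv]
  · by_cases hcv : c = v
    · subst hcv; simp [trMap, hP]
    · simp [trMap, hP, hcv]

theorem fold_invariant :
    ∀ (vs P : List Char), (∀ v ∈ vs, v ∉ P) → vs.Nodup → ∀ s : List Char,
      vs.foldl (fun t v => PySem.Chars.replace t [v] [v, v, v]) (s.flatMap (trMap P))
        = s.flatMap (trMap (P ++ vs)) := by
  intro vs
  induction vs with
  | nil => intro P _ _ s; simp
  | cons v rest ih =>
    intro P hdisj hnd s
    simp only [List.foldl_cons]
    rw [step_flatMap P v (hdisj v (List.mem_cons_self)) s]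
    have hd : ∀ w ∈ rest, w ∉ P ++ [v] := by
      intro w hw
      simp only [List.mem_append, List.mem_singleton, not_or]
      exact ⟨hdisj w (List.mem_cons_of_mem _ hw),
        fun h => (List.nodup_cons.mp hnd).1 (h ▸ hw)⟩
    rw [ih (P ++ [v]) hd (List.nodup_cons.mp hnd).2 s]
    simp

-- B's string-level fold computes the Chars-level fold
theorem alt_toList_fold :
    ∀ (vs : List Char) (t : String),
      (vs.foldl (fun t v => PySem.Str.replace t (String.ofList [v]) (String.ofList [v, v, v])) t).toList
        = vs.foldl (fun t v => PySem.Chars.replace t [v] [v, v, v]) t.toList := by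
  intro vs
  induction vs with
  | nil => intro t; rfl
  | cons v rest ih =>
    intro t
    rw [List.foldl_cons, List.foldl_cons,
      show PySem.Str.replace t (String.ofList [v]) (String.ofList [v, v, v])
        = String.ofList (PySem.Chars.replace t.toList [v] [v, v, v]) by simp [PySem.Str.replace],
      ih]
    rw [String.toList_ofList]

theorem alt_toList (text : String) :
    (triple_vowels_alt text).toList
      = text.toList.flatMap (trMap "aeiouAEIOU".toList) := by
  unfold triple_vowels_alt
  rw [alt_toList_fold]
  have h0 : text.toList.flatMap (trMap []) = text.toList := by
    induction text.toList with
    | nil => rfl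
    | cons c t ih => rw [List.flatMap_cons, ih, trMap, if_neg List.not_mem_nil, List.singleton_append]
  conv_lhs => rw [← h0]
  rw [fold_invariant "aeiouAEIOU".toList [] (by intro v _; simp) (by decide)]
  simp

-- A's joined pieces are the same flatMap
theorem a_toList (text : String) :
    (triple_vowels text).toList
      = text.toList.flatMap (trMap "aeiouAEIOU".toList) := by
  unfold triple_vowels
  have hfun : (fun (acc : List String) (i : Char) =>
      if "aeiouAEIOU".toList.contains i then acc ++ [String.ofList [i, i, i]]
      else acc ++ [String.ofList [i]])
    = (fun acc i => acc ++ [String.ofList (trMap "aeiouAEIOU".toList i)]) := by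
    funext acc i
    by_cases h : i ∈ "aeiouAEIOU".toList
    · rw [if_pos (by simpa using h), trMap, if_pos h]
    · rw [if_neg (by simpa using h), trMap, if_neg h]
  rw [hfun, PySem.List.foldl_append_singleton_eq_map]
  simp only [List.nil_append]
  rw [PySem.Str.join]
  simp only [String.toList_ofList]
  rw [show ("" : String).toList = [] from rfl, join_empty]
  rw [List.flatMap_def, List.map_map]
  simp [Function.comp_def]

theorem triple_vowels_eq (text : String) : triple_vowels text = triple_vowels_alt text := by
  have h : (triple_vowels text).toList = (triple_vowels_alt text).toList := by
    rw [a_toList, alt_toList]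
  calc triple_vowels text = String.ofList (triple_vowels text).toList := by simp
    _ = String.ofList (triple_vowels_alt text).toList := by rw [h]
    _ = triple_vowels_alt text := by simp

-- ===== VERDICT (by name: the statement is the Claim_ definition above) =====
theorem triple_vowels_spec : Claim_equal_triple_vowels := by
  intro text _
  exact triple_vowels_eq text
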